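-- pv_equiv track=rewrite | github.com/itzzetson/CineRate-AI | train_audience_rating.py | _detect_feature_types
-- ===== SOURCE A (Python) =====
-- from typing import List, Tuple, Dict, Any
--
-- def _is_float(value: str) -> bool:
--     try:
--         float(value)
--         return True
--     except Exception:
--         return False
--
-- def _detect_feature_types(rows: List[Dict[str, str]], target: str) -> Tuple[List[str], List[str]]:
--     keys = [k for k in rows[0].keys() if k != target]
--     numeric = []
--     categorical = []
--     for k in keys:
--         all_float = True
--         for r in rows:
--             v = r.get(k, "")
--             if v == "":
--                 continue
--             if not _is_float(v):
--                 all_float = False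
--                 break
--         if all_float:
--             numeric.append(k)
--         else:
--             categorical.append(k)
--     return numeric, categorical
-- ===== SOURCE B (Python) =====
-- from typing import List, Tuple, Dict
--
-- def _is_float(value: str) -> bool:
--     try:
--         float(value)
--         return True
--     except Exception:
--         return False
--
-- def _detect_feature_types(rows: List[Dict[str, str]], target: str) -> Tuple[List[str], List[str]]:
--     # one pass over all (key, value) items, collecting the keys that are
--     # disqualified by some non-empty non-float value; then split rows[0]'s keys
--     bad = set()
--     for r in rows:
--         for k, v in r.items():
--             if k != target and v != "" and not _is_float(v):
--                 bad.add(k)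
--     keys = [k for k in rows[0].keys() if k != target]
--     return [k for k in keys if k not in bad], [k for k in keys if k in bad]
-- ===== Notes on version B (the rewrite author's own statement) =====
-- stated objective: alternative
-- what changed: Replaces A's key-outer/row-inner nested scan (restarting over all rows for every key, with an early break) by one item-level pass over all rows that accumulates a set of disqualified keys, then splits rows[0]'s key list by membership in that set.
-- outside the precondition, e.g. on _detect_feature_types([], 't'): A raises IndexError, B raises IndexError
import Mathlib
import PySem

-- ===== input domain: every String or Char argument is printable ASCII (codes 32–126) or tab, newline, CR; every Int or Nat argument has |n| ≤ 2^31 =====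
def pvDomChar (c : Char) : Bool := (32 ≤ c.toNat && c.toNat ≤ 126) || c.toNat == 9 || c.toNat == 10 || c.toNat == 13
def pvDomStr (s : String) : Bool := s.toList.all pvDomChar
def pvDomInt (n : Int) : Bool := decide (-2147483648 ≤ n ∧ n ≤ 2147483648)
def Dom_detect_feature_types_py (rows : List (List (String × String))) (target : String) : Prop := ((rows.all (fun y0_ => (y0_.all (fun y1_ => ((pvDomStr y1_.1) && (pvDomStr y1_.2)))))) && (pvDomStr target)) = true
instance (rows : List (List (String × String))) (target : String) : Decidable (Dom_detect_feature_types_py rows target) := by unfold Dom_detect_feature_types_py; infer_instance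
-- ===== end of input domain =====

-- B replaces A's key-outer/row-inner nested scan by one item-level pass over all rows that
-- accumulates a set of disqualified keys, then splits rows[0]'s key list by membership
-- (objective: alternative decomposition, same worst-case cost).

-- ===== shared helper: the Python helper `_is_float` (try: float(value)), identical in A and B =====
-- Hand-ported grammar of Python's float() string acceptance, exact on the printable-ASCII +
-- tab/newline/CR domain: optional whitespace, optional sign, then inf/infinity/nan (any case) or
-- digits-with-PEP-515-underscores with optional '.' part and optional exponent.
def pvIsWS (c : Char) : Bool := c = ' ' || c = '\t' || c = '\n' || c = '\r'

-- rest of a digit run: digits, with '_' allowed only between two digits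
def pvDigRest : List Char → List Char
  | [] => []
  | c :: rest =>
    if c.isDigit then pvDigRest rest
    else if c = '_' then
      match rest with
      | d :: rest' => if d.isDigit then pvDigRest rest' else c :: d :: rest'
      | [] => [c]
    else c :: rest

-- a nonempty digit run (with underscores); returns the remainder, none if no leading digit
def pvParseDigits : List Char → Option (List Char)
  | c :: rest => if c.isDigit then some (pvDigRest rest) else none
  | [] => none

-- valid optional exponent part consuming the whole remainder
def pvParseExp : List Char → Bool
  | [] => true
  | c :: rest =>
    if c = 'e' || c = 'E' then
      let rest2 := match rest with
        | s :: r => if s = '+' || s = '-' then r else s :: r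
        | [] => []
      match pvParseDigits rest2 with
      | some [] => true
      | _ => false
    else false

-- mantissa (digits / digits '.' / digits '.' digits / '.' digits) followed by a valid exponent
def pvMantissa (cs : List Char) : Bool :=
  match cs with
  | '.' :: rest =>
    match pvParseDigits rest with
    | some r => pvParseExp r
    | none => false
  | _ =>
    match pvParseDigits cs with
    | some r =>
      match r with
      | '.' :: r2 =>
        match pvParseDigits r2 with
        | some r3 => pvParseExp r3
        | none => pvParseExp r2
      | _ => pvParseExp r
    | none => false

def pvIsFloat (s : String) : Bool :=
  let cs := ((s.toList.dropWhile pvIsWS).reverse.dropWhile pvIsWS).reverse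
  let cs := match cs with
    | c :: r => if c = '+' || c = '-' then r else c :: r
    | [] => []
  let low := cs.map Char.toLower
  if low = "inf".toList ∨ low = "infinity".toList ∨ low = "nan".toList then true
  else pvMantissa cs

-- ===== PORT A =====
-- r.get(k, "") on a row dict
def pvRowGet (r : List (String × String)) (k : String) : String :=
  (PySem.Dict.mk r).getD k ""

-- inner loop of A over rows for one key k, with the early break on a non-float value
def pvAllFloat (rows : List (List (String × String))) (k : String) : Bool :=
  match rows with
  | [] => true
  | r :: rest =>
    let v := pvRowGet r k
    if v = "" then pvAllFloat rest k
    else if !(pvIsFloat v) then false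
    else pvAllFloat rest k

def detect_feature_types_py (rows : List (List (String × String))) (target : String) : List String × List String :=
  match rows with
  | [] => ([], [])  -- unreachable: Python raises IndexError on rows[0]; excluded by Pre_
  | r0 :: _ =>
    let keys := ((PySem.Dict.mk r0).keys).filter (fun k => k ≠ target)
    keys.foldl
      (fun (acc : List String × List String) k =>
        if pvAllFloat rows k then (acc.1 ++ [k], acc.2) else (acc.1, acc.2 ++ [k]))
      ([], [])

-- ===== PORT B =====
-- B's disqualification test on one (key, value) item
def pvBadCond (target : String) (kv : String × String) : Bool :=
  kv.1 ≠ target && kv.2 ≠ "" && !(pvIsFloat kv.2)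

def detect_feature_types_py_alt (rows : List (List (String × String))) (target : String) : List String × List String :=
  let bad : PySem.Set String :=
    rows.foldl
      (fun bad r =>
        ((PySem.Dict.mk r).items).foldl
          (fun (bad : PySem.Set String) kv =>
            if pvBadCond target kv then PySem.Set.add bad kv.1 else bad)
          bad)
      PySem.Set.empty
  match rows with
  | [] => ([], [])  -- unreachable: Python raises IndexError on rows[0]; excluded by Pre_
  | r0 :: _ =>
    ((((PySem.Dict.mk r0).keys).filter (fun k => k ≠ target)).filter
        (fun k => !(PySem.Set.contains bad k)),
     (((PySem.Dict.mk r0).keys).filter (fun k => k ≠ target)).filter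
        (fun k => PySem.Set.contains bad k))

-- ===== PRECONDITION & SPEC =====
-- Pre_ excludes rows = [], on which Python A raises IndexError at rows[0], and association
-- lists with duplicate keys inside a row, which do not represent any Python dict (the ports'
-- behaviour there is an artefact of the encoding).
def Pre_detect_feature_types_py (rows : List (List (String × String))) (target : String) : Prop :=
  rows ≠ [] ∧ ∀ r ∈ rows, (r.map Prod.fst).Nodup
instance (rows : List (List (String × String))) (target : String) : Decidable (Pre_detect_feature_types_py rows target) := by unfold Pre_detect_feature_types_py; infer_instance
def pvWitness_detect_feature_types_py : (List (List (String × String))) × String := ([[("a", "1.5"), ("t", "x")]], "t")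

def Spec_detect_feature_types_py (rows : List (List (String × String))) (target : String) (out : List String × List String) : Prop := out = detect_feature_types_py_alt rows target
instance (rows : List (List (String × String))) (target : String) (out : List String × List String) : Decidable (Spec_detect_feature_types_py rows target out) := by unfold Spec_detect_feature_types_py; infer_instance

-- ===== CLAIM (what is proved, stated in full; the proofs are below) =====
def Claim_equal_detect_feature_types_py : Prop := ∀ (rows : List (List (String × String))) (target : String), Dom_detect_feature_types_py rows target → Pre_detect_feature_types_py rows target → Spec_detect_feature_types_py rows target (detect_feature_types_py rows target)

-- ===== LEMMAS AND PROOFS =====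

-- A's inner loop over the rows is the conjunction of the per-row "ok" check
theorem pvAllFloat_eq_all (rows : List (List (String × String))) (k : String) :
    pvAllFloat rows k
      = rows.all (fun r => pvRowGet r k = "" || pvIsFloat (pvRowGet r k)) := by
  induction rows with
  | nil => rfl
  | cons r rest ih =>
    simp only [pvAllFloat, List.all_cons, ih]
    by_cases h : pvRowGet r k = ""
    · simp [h]
    · by_cases hf : pvIsFloat (pvRowGet r k) <;> simp [h, hf]

-- membership after B's inner fold over one row's items
theorem mem_inner_fold (target : String) (items : List (String × String))
    (s : PySem.Set String) (k : String) :
    k ∈ items.foldl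
        (fun (s : PySem.Set String) kv =>
          if pvBadCond target kv then PySem.Set.add s kv.1 else s) s
      ↔ k ∈ s ∨ ∃ kv ∈ items, pvBadCond target kv = true ∧ kv.1 = k := by
  induction items generalizing s with
  | nil => simp
  | cons kv rest ih =>
    simp only [List.foldl_cons, ih]
    by_cases h : pvBadCond target kv = true
    · simp only [h, if_true, PySem.Set.mem_add, List.mem_cons]
      constructor
      · rintro ((hs | hk) | ⟨kv', hm, hc, hk⟩)
        · exact Or.inl hs
        · exact Or.inr ⟨kv, Or.inl rfl, h, hk.symm⟩
        · exact Or.inr ⟨kv', Or.inr hm, hc, hk⟩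
      · rintro (hs | ⟨kv', hmm, hc, hk⟩)
        · exact Or.inl (Or.inl hs)
        · rcases hmm with rfl | hm
          · exact Or.inl (Or.inr hk.symm)
          · exact Or.inr ⟨kv', hm, hc, hk⟩
    · simp only [h, List.mem_cons]
      constructor
      · rintro (hs | ⟨kv', hm, hc, hk⟩)
        · exact Or.inl hs
        · exact Or.inr ⟨kv', Or.inr hm, hc, hk⟩
      · rintro (hs | ⟨kv', hmm, hc, hk⟩)
        · exact Or.inl hs
        · rcases hmm with rfl | hm
          · exact absurd hc h
          · exact Or.inr ⟨kv', hm, hc, hk⟩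

-- membership after B's outer fold over the rows
theorem mem_bad_fold (target : String) (rows : List (List (String × String)))
    (s : PySem.Set String) (k : String) :
    k ∈ rows.foldl
        (fun bad r =>
          ((PySem.Dict.mk r).items).foldl
            (fun (bad : PySem.Set String) kv =>
              if pvBadCond target kv then PySem.Set.add bad kv.1 else bad)
            bad) s
      ↔ k ∈ s ∨ ∃ r ∈ rows, ∃ kv ∈ (PySem.Dict.mk r).items, pvBadCond target kv = true ∧ kv.1 = k := by
  induction rows generalizing s with
  | nil => simp
  | cons r rest ih =>
    simp only [List.foldl_cons, ih, mem_inner_fold]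
    simp [or_assoc]

-- on a duplicate-free row, B's item-level disqualification of k is exactly the failure of
-- A's per-key check (for k ≠ target)
theorem row_char (target : String) (r : List (String × String)) (k : String)
    (hk : k ≠ target) (hnd : ((PySem.Dict.mk r).keys).Nodup) :
    (∃ kv ∈ (PySem.Dict.mk r).items, pvBadCond target kv = true ∧ kv.1 = k)
      ↔ ¬(pvRowGet r k = "" ∨ pvIsFloat (pvRowGet r k) = true) := by
  unfold pvRowGet
  constructor
  · rintro ⟨⟨k', v⟩, hmem, hcond, rfl⟩
    have hget : (PySem.Dict.mk r).get? k' = some v :=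
      PySem.Dict.get?_of_mem_items _ hmem hnd
    have hD : (PySem.Dict.mk r).getD k' "" = v :=
      PySem.Dict.getD_of_get?_eq_some _ _ hget
    simp only [pvBadCond, Bool.and_eq_true, Bool.not_eq_true', decide_eq_true_eq,
      ne_eq] at hcond
    rw [hD]
    push Not
    exact ⟨hcond.1.2, by simpa using hcond.2⟩
  · intro h
    push Not at h
    obtain ⟨hne, hnf⟩ := h
    cases hget : (PySem.Dict.mk r).get? k with
    | none =>
      exact absurd (PySem.Dict.getD_of_get?_eq_none _ _ hget) hne
    | some v =>
      have hD : (PySem.Dict.mk r).getD k "" = v :=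
        PySem.Dict.getD_of_get?_eq_some _ _ hget
      refine ⟨(k, v), PySem.Dict.mem_items_of_get?_eq_some _ hget, ?_, rfl⟩
      rw [hD] at hne hnf
      simp [pvBadCond, hk, hne, hnf]

-- B's bad-set membership, as a Bool, is the negation of A's per-key conjunction
theorem contains_bad (target : String) (rows : List (List (String × String))) (k : String)
    (hk : k ≠ target) (hnd : ∀ r ∈ rows, (r.map Prod.fst).Nodup) :
    PySem.Set.contains
      (rows.foldl
        (fun bad r =>
          ((PySem.Dict.mk r).items).foldl
            (fun (bad : PySem.Set String) kv =>
              if pvBadCond target kv then PySem.Set.add bad kv.1 else bad)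
            bad)
        PySem.Set.empty) k
      = !(rows.all (fun r => pvRowGet r k = "" || pvIsFloat (pvRowGet r k))) := by
  by_cases hex : ∃ r ∈ rows, ¬(pvRowGet r k = "" ∨ pvIsFloat (pvRowGet r k) = true)
  · obtain ⟨r, hr, hbadrow⟩ := hex
    have hnd' : ((PySem.Dict.mk r).keys).Nodup := by
      simpa [PySem.Dict.keys] using hnd r hr
    have hmem := (mem_bad_fold target rows PySem.Set.empty k).mpr
      (Or.inr ⟨r, hr, (row_char target r k hk hnd').mpr hbadrow⟩)
    rw [(PySem.Set.contains_iff _ _).mpr hmem]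
    symm
    push Not at hbadrow
    simp only [Bool.not_eq_true', List.all_eq_false]
    exact ⟨r, hr, by simp [hbadrow.1, hbadrow.2]⟩
  · have hnomem : k ∉ rows.foldl
        (fun bad r =>
          ((PySem.Dict.mk r).items).foldl
            (fun (bad : PySem.Set String) kv =>
              if pvBadCond target kv then PySem.Set.add bad kv.1 else bad)
            bad)
        PySem.Set.empty := by
      intro hmem
      rcases (mem_bad_fold target rows PySem.Set.empty k).mp hmem with h | ⟨r, hr, hkv⟩
      · simp [PySem.Set.empty] at h
      · exact hex ⟨r, hr, (row_char target r k hk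
          (by simpa [PySem.Dict.keys] using hnd r hr)).mp hkv⟩
    rw [Bool.eq_false_iff.mpr (mt (PySem.Set.contains_iff _ _).mp hnomem)]
    symm
    push Not at hex
    simp only [Bool.not_eq_false', List.all_eq_true]
    intro r hr
    rcases hex r hr with h | h <;> simp [h]

-- A's append-accumulating fold over the keys produces the two filters
theorem foldl_partition (q : String → Bool) (keys : List String) (acc : List String × List String) :
    keys.foldl
      (fun (acc : List String × List String) k =>
        if q k then (acc.1 ++ [k], acc.2) else (acc.1, acc.2 ++ [k])) acc
      = (acc.1 ++ keys.filter q, acc.2 ++ keys.filter (fun k => !q k)) := by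
  induction keys generalizing acc with
  | nil => simp
  | cons k rest ih =>
    simp only [List.foldl_cons, List.filter_cons]
    cases h : q k <;> simp [ih]

-- ===== VERDICT (by name: the statement is the Claim_ definition above) =====
theorem detect_feature_types_py_spec : Claim_equal_detect_feature_types_py := by
  intro rows target _dom hpre
  obtain ⟨hne, hnd⟩ := hpre
  unfold Spec_detect_feature_types_py
  match rows, hne with
  | r0 :: rest, _ =>
    simp only [detect_feature_types_py, detect_feature_types_py_alt, foldl_partition,
      List.nil_append]
    refine congrArg₂ Prod.mk ?_ ?_ <;>
      refine List.filter_congr (fun k hkmem => ?_) <;>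
      have hk : k ≠ target := by simpa using List.of_mem_filter hkmem
    · rw [contains_bad target (r0 :: rest) k hk hnd, pvAllFloat_eq_all]
      simp
    · rw [contains_bad target (r0 :: rest) k hk hnd, pvAllFloat_eq_all]
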